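-- pv_equiv track=rewrite | github.com/ryanklaiber/Possible | replacequotes.py | replace_double_quotes_with_parentheses
-- ===== SOURCE A (Python) =====
-- def replace_double_quotes_with_parentheses(s: str) -> str:
--     """Replaces every pair of double quotes in a string with open and closed parentheses."""
--     stack = []
--     result = []
--     for char in s:
--         if char == '"':
--             if not stack:
--                 result.append('(')
--                 stack.append('"')
--             else:
--                 result.append(')')
--                 stack.pop()
--         else:
--             result.append(char)
--     return ''.join(result)
-- ===== SOURCE B (Python) =====
-- def replace_double_quotes_with_parentheses(s: str) -> str:
--     """Split on '"' and rejoin with alternating '(' / ')' separators."""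
--     parts = s.split('"')
--     out = [parts[0]]
--     for i, part in enumerate(parts[1:]):
--         out.append('(' if i % 2 == 0 else ')')
--         out.append(part)
--     return ''.join(out)
-- ===== Notes on version B (the rewrite author's own statement) =====
-- stated objective: idiomatic
-- what changed: Replaces the per-character scan with an explicit toggle stack by splitting on the double-quote character and rejoining the pieces with alternating open/close parenthesis separators.
import Mathlib
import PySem

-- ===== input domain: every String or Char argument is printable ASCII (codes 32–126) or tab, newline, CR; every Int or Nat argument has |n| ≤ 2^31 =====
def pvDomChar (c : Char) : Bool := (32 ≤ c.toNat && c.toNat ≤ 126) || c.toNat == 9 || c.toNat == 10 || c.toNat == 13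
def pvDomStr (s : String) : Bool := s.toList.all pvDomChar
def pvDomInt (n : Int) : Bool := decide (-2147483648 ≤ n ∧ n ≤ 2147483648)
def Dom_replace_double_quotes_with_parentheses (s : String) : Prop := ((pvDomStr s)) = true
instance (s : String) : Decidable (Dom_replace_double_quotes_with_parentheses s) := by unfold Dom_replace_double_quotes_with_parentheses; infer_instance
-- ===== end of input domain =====

-- B replaces A's per-character scan with a toggle stack by split-on-'"' and rejoin
-- with alternating '('/')' separators (idiomatic decomposition; measured faster by constant factor: C-level split/join vs a Python char loop).


-- ===== PORT A =====
-- literal port: state = (stack, result); append = ++ [·], pop = dropLast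
def replace_double_quotes_with_parentheses (s : String) : String :=
  let st := s.toList.foldl
    (fun (p : List Char × List Char) char =>
      if char = '"' then
        if p.1.isEmpty then (p.1 ++ ['"'], p.2 ++ ['('])
        else (p.1.dropLast, p.2 ++ [')'])
      else (p.1, p.2 ++ [char]))
    (([] : List Char), ([] : List Char))
  String.ofList st.2

-- ===== PORT B =====
-- parts = s.split('"'); out = [parts[0]]; for i, part in enumerate(parts[1:]): …; ''.join(out)
-- (parts[0] ported as headD: split always returns a nonempty list, so the default is never used)
def replace_double_quotes_with_parentheses_alt (s : String) : String :=
  let parts := PySem.Chars.splitOn s.toList ['"']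
  let out := (PySem.List.enumerate parts.tail 0).foldl
    (fun acc ip =>
      acc ++ (if PySem.Int.mod ip.1 2 == 0 then ['('] else [')']) ++ ip.2)
    (parts.headD [])
  String.ofList out

-- ===== PRECONDITION & SPEC =====
def Spec_replace_double_quotes_with_parentheses (s : String) (out : String) : Prop := out = replace_double_quotes_with_parentheses_alt s
instance (s : String) (out : String) : Decidable (Spec_replace_double_quotes_with_parentheses s out) := by unfold Spec_replace_double_quotes_with_parentheses; infer_instance

-- ===== CLAIM (what is proved, stated in full; the proofs are below) =====
def Claim_equal_replace_double_quotes_with_parentheses : Prop := ∀ (s : String), Dom_replace_double_quotes_with_parentheses s → Spec_replace_double_quotes_with_parentheses s (replace_double_quotes_with_parentheses s)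

-- ===== LEMMAS AND PROOFS =====

-- common reference function: replace each '"' by '(' / ')' alternating, b = "inside quotes"
def pvRepl : List Char → Bool → List Char
  | [], _ => []
  | c :: cs, b =>
    if c = '"' then (if b then ')' else '(') :: pvRepl cs (!b)
    else c :: pvRepl cs b

-- split on '"' at the character level (reference for splitOn)
def pvSplit1 : List Char → List (List Char)
  | [] => [[]]
  | c :: cs =>
    if c = '"' then [] :: pvSplit1 cs
    else
      match pvSplit1 cs with
      | [] => [[c]]          -- unreachable
      | h :: t => (c :: h) :: t

lemma pvSplit1_ne_nil (cs : List Char) : pvSplit1 cs ≠ [] := by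
  cases cs with
  | nil => simp [pvSplit1]
  | cons c cs =>
    simp only [pvSplit1]
    split_ifs
    · simp
    · cases h : pvSplit1 cs <;> simp

-- prepend x onto the head piece
def pvConsHead (x : List Char) : List (List Char) → List (List Char)
  | [] => [x]
  | h :: t => (x ++ h) :: t

lemma pvGo_spec : ∀ (cs : List Char) (fuel : Nat) (cur : List Char) (acc : List (List Char)),
    cs.length < fuel →
    PySem.Chars.splitOn.go ['"'] fuel cs cur acc
      = acc.reverse ++ pvConsHead cur.reverse (pvSplit1 cs) := by
  intro cs
  induction cs with
  | nil =>
    intro fuel cur acc h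
    cases fuel with
    | zero => omega
    | succ n => simp [PySem.Chars.splitOn.go, pvSplit1, pvConsHead]
  | cons c cs ih =>
    intro fuel cur acc h
    cases fuel with
    | zero => simp at h
    | succ n =>
      by_cases hc : c = '"'
      · subst hc
        rw [show PySem.Chars.splitOn.go ['"'] (n+1) ('"' :: cs) cur acc
              = PySem.Chars.splitOn.go ['"'] n cs [] (cur.reverse :: acc) by
            simp [PySem.Chars.splitOn.go, List.isPrefixOf]]
        rw [ih n [] (cur.reverse :: acc) (by simpa using h)]
        have hne := pvSplit1_ne_nil cs
        cases hs : pvSplit1 cs with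
        | nil => exact absurd hs hne
        | cons h t =>
          simp [pvSplit1, pvConsHead, hs]
      · have hpref : (['"'].isPrefixOf (c :: cs)) = false := by
          simp [List.isPrefixOf, Ne.symm hc]
        rw [show PySem.Chars.splitOn.go ['"'] (n+1) (c :: cs) cur acc
              = PySem.Chars.splitOn.go ['"'] n cs (c :: cur) acc by
            simp [PySem.Chars.splitOn.go, hpref]]
        rw [ih n (c :: cur) acc (by simpa using h)]
        have hne := pvSplit1_ne_nil cs
        cases hs : pvSplit1 cs with
        | nil => exact absurd hs hne
        | cons h t =>
          simp [pvSplit1, hc, hs, pvConsHead]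
  
lemma splitOn_quote (cs : List Char) : PySem.Chars.splitOn cs ['"'] = pvSplit1 cs := by
  rw [PySem.Chars.splitOn, pvGo_spec cs (cs.length + 1) [] [] (by omega)]
  have hne := pvSplit1_ne_nil cs
  cases hs : pvSplit1 cs with
  | nil => exact absurd hs hne
  | cons h t => simp [pvConsHead]

-- A's fold computes pvRepl (stack is [] or ['"'], tracked by b)
lemma foldA_spec : ∀ (cs : List Char) (b : Bool) (res : List Char),
    (cs.foldl
      (fun (p : List Char × List Char) char =>
        if char = '"' then
          if p.1.isEmpty then (p.1 ++ ['"'], p.2 ++ ['('])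
          else (p.1.dropLast, p.2 ++ [')'])
        else (p.1, p.2 ++ [char]))
      ((if b then ['"'] else []), res)).2 = res ++ pvRepl cs b := by
  intro cs
  induction cs with
  | nil => intro b res; simp [pvRepl]
  | cons c cs ih =>
    intro b res
    by_cases hc : c = '"'
    · subst hc
      cases b with
      | false =>
        simpa [pvRepl] using ih true (res ++ ['('])
      | true =>
        simpa [pvRepl] using ih false (res ++ [')'])
    · cases b with
      | false => simpa [pvRepl, hc] using ih false (res ++ [c])
      | true => simpa [pvRepl, hc] using ih true (res ++ [c])

-- B's rebuild of the tail pieces, with parity b (b = next separator is ')')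
def pvBuild : Bool → List (List Char) → List Char
  | _, [] => []
  | b, p :: ps => (if b then [')'] else ['(']) ++ p ++ pvBuild (!b) ps

lemma foldB_spec : ∀ (ps : List (List Char)) (k : Int) (acc : List Char), 0 ≤ k →
    (PySem.List.enumerate ps k).foldl
      (fun acc ip =>
        acc ++ (if PySem.Int.mod ip.1 2 == 0 then ['('] else [')']) ++ ip.2) acc
      = acc ++ pvBuild (PySem.Int.mod k 2 == 1) ps := by
  intro ps
  induction ps with
  | nil => intro k acc _; simp [PySem.List.enumerate, pvBuild]
  | cons p ps ih =>
    intro k acc hk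
    rw [PySem.List.enumerate_cons, List.foldl_cons, ih (k + 1) _ (by omega)]
    have hmod : PySem.Int.mod k 2 = k % 2 ∧ PySem.Int.mod (k + 1) 2 = (k + 1) % 2 := by
      constructor <;> simp [PySem.Int.mod, Int.fmod_eq_emod]
    rcases hmod with ⟨h1, h2⟩
    rcases Int.emod_two_eq_zero_or_one k with h | h
    · have : (k + 1) % 2 = 1 := by omega
      simp [h, this, pvBuild]
    · have : (k + 1) % 2 = 0 := by omega
      simp [h, this, pvBuild]

-- split-then-rebuild equals pvRepl
lemma split_build (cs : List Char) : ∀ (b : Bool),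
    (pvSplit1 cs).headD [] ++ pvBuild b (pvSplit1 cs).tail = pvRepl cs b := by
  induction cs with
  | nil => intro b; simp [pvSplit1, pvBuild, pvRepl]
  | cons c cs ih =>
    intro b
    by_cases hc : c = '"'
    · subst hc
      have hne := pvSplit1_ne_nil cs
      cases hs : pvSplit1 cs with
      | nil => exact absurd hs hne
      | cons h t =>
        have := ih (!b)
        rw [hs] at this
        simp only [pvSplit1, hs, pvRepl, List.headD, List.tail]
        cases b <;> simpa [pvBuild] using this
    · have hne := pvSplit1_ne_nil cs
      cases hs : pvSplit1 cs with
      | nil => exact absurd hs hne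
      | cons h t =>
        have := ih b
        rw [hs] at this
        simp only [pvSplit1, hs, hc, pvRepl, List.headD, List.tail] at this ⊢
        simpa using this

-- ===== VERDICT (by name: the statement is the Claim_ definition above) =====
theorem replace_double_quotes_with_parentheses_spec : Claim_equal_replace_double_quotes_with_parentheses := by
  intro s _
  unfold Spec_replace_double_quotes_with_parentheses
  unfold replace_double_quotes_with_parentheses replace_double_quotes_with_parentheses_alt
  simp only [splitOn_quote]
  rw [foldB_spec _ 0 _ (by omega)]
  have hA := foldA_spec s.toList false []
  simp only [if_neg (Bool.false_ne_true)] at hA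
  rw [hA]
  have hB := split_build s.toList false
  have h0 : (PySem.Int.mod 0 2 == 1) = false := by decide
  rw [h0] at *
  simp only [List.nil_append]
  rw [split_build s.toList false]
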